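-- pv_equiv track=rewrite | github.com/Clamepending/remote-vibes | experiments/arc-swarm/runs/hybrid/solver.py | _complete_horizontal_symmetry
-- ===== SOURCE A (Python) =====
-- Grid = list[list[int]]
--
-- def _complete_horizontal_symmetry(g: Grid) -> Grid:
--     """Mirror each row: out[r][W-1-c] = max(out[r][W-1-c], g[r][c]) for non-zero."""
--     h = len(g)
--     w = len(g[0])
--     out = [row[:] for row in g]
--     for r in range(h):
--         for c in range(w):
--             v = g[r][c]
--             if v != 0:
--                 mirror = w - 1 - c
--                 if out[r][mirror] == 0:
--                     out[r][mirror] = v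
--     return out
-- ===== SOURCE B (Python) =====
-- def _complete_horizontal_symmetry(g):
--     w = len(g[0])  # raises IndexError on an empty grid, as the original does
--
--     def merge_ends(xs):
--         # two-pointer recursion: peel a cell off each end at once; a zero end
--         # is filled from the opposite end, then recurse on the interior
--         if len(xs) <= 1:
--             return list(xs)
--         a, b = xs[0], xs[-1]
--         return [a if a else b] + merge_ends(xs[1:-1]) + [b if b else a]
--
--     return [merge_ends(row[:w]) + row[w:] for row in g]
-- ===== Notes on version B (the rewrite author's own statement) =====
-- stated objective: alternative
-- what changed: Replaces A's index-based double loop that conditionally overwrites out[r][w-1-c] in a copied grid by a per-row two-pointer recursion that peels a cell off both ends at once, fills a zero end from the opposite end, and recurses on the interior; trades the flat loop for structural recursion with slice copies.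
import Mathlib
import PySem

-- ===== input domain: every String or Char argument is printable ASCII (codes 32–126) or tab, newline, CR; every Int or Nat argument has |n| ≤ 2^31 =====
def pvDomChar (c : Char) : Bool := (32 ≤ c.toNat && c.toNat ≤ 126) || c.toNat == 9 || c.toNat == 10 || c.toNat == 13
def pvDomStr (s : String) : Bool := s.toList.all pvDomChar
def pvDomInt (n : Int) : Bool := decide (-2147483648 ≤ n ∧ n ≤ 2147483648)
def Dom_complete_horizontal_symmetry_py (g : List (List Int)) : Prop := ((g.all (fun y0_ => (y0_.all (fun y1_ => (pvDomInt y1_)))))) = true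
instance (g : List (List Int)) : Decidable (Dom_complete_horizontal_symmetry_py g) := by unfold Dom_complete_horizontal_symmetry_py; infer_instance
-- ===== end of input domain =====

-- B replaces A's in-place mirror-write double loop by a per-row two-pointer
-- recursion that peels a cell off both ends at once, fills a zero end from the
-- opposite end and recurses on the interior (objective: alternative).
-- Neither program mutates its argument; both build a fresh grid.

-- ===== PORT A =====
-- literal transliteration: copy g, then for r in range(h), c in range(w),
-- conditionally write v into out[r][w-1-c]
def complete_horizontal_symmetry_py (g : List (List Int)) : List (List Int) :=
  let h := g.length
  let w := (g.headD []).length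
  let out := g.map (fun row => row)          -- out = [row[:] for row in g]
  (List.range h).foldl (fun out r =>
    (List.range w).foldl (fun out c =>
      let v := (g.getD r []).getD c 0
      if v ≠ 0 then
        let mirror := w - 1 - c
        if (out.getD r []).getD mirror 0 = 0 then
          out.set r ((out.getD r []).set mirror v)
        else out
      else out) out) out

-- ===== PORT B =====
-- merge_ends: if len(xs) <= 1 return xs; else [a if a else b] + merge_ends(xs[1:-1]) + [b if b else a]
-- (xs[0] → headD, xs[-1] → getLastD, xs[1:-1] → tail.dropLast — exact on len ≥ 2)
def mergeEnds (xs : List Int) : List Int :=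
  if _h : xs.length ≤ 1 then xs
  else
    let a := xs.headD 0
    let b := xs.getLastD 0
    ((if a ≠ 0 then a else b) :: (mergeEnds xs.tail.dropLast ++ [if b ≠ 0 then b else a]))
termination_by xs.length
decreasing_by simp only [List.length_dropLast, List.length_tail]; omega

def complete_horizontal_symmetry_py_alt (g : List (List Int)) : List (List Int) :=
  let w := (g.headD []).length
  g.map (fun row => mergeEnds (row.take w) ++ row.drop w)

-- ===== PRECONDITION & SPEC =====
-- Pre_ is exactly the set of inputs on which A returns: g non-empty (A raises
-- IndexError on an empty grid) and every row at least len(g[0]) long (A reads g[r][c] for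
-- every c < len(g[0]) and raises IndexError on a shorter row).
def Pre_complete_horizontal_symmetry_py (g : List (List Int)) : Prop :=
  g ≠ [] ∧ ∀ row ∈ g, (g.headD []).length ≤ row.length
instance (g : List (List Int)) : Decidable (Pre_complete_horizontal_symmetry_py g) := by
  unfold Pre_complete_horizontal_symmetry_py; infer_instance
def pvWitness_complete_horizontal_symmetry_py : List (List Int) := [[1, 0], [0, 2]]

def Spec_complete_horizontal_symmetry_py (g : List (List Int)) (out : List (List Int)) : Prop := out = complete_horizontal_symmetry_py_alt g
instance (g : List (List Int)) (out : List (List Int)) : Decidable (Spec_complete_horizontal_symmetry_py g out) := by unfold Spec_complete_horizontal_symmetry_py; infer_instance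

-- ===== CLAIM (what is proved, stated in full; the proofs are below) =====
def Claim_equal_complete_horizontal_symmetry_py : Prop := ∀ (g : List (List Int)), Dom_complete_horizontal_symmetry_py g → Pre_complete_horizontal_symmetry_py g → Spec_complete_horizontal_symmetry_py g (complete_horizontal_symmetry_py g)

-- ===== LEMMAS AND PROOFS =====

theorem getD_set_eq {α : Type} (d v : α) : ∀ (l : List α) (i : Nat), i < l.length → (l.set i v).getD i d = v := by
  intro l
  induction l with
  | nil => intro i h; simp at h
  | cons a l ih =>
    intro i h
    cases i with
    | zero => simp
    | succ i => simpa using ih i (by simpa using h)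

theorem getD_set_ne {α : Type} (d v : α) : ∀ (l : List α) (i j : Nat), i ≠ j → (l.set i v).getD j d = l.getD j d := by
  intro l
  induction l with
  | nil => intro i j h; simp
  | cons a l ih =>
    intro i j h
    cases i with
    | zero => cases j with
      | zero => exact absurd rfl h
      | succ j => simp
    | succ i => cases j with
      | zero => simp
      | succ j => simpa using ih i j (by omega)

theorem set_getD_self {α : Type} (d : α) (l : List α) (i : Nat) : l.set i (l.getD i d) = l := by
  induction l generalizing i with
  | nil => simp
  | cons a l ih =>
    cases i with
    | zero => simp
    | succ i => simpa using ih i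

-- the inner-loop body of A, acting on one row (v = grow[c])
def chsStep (w : Nat) (grow : List Int) (o : List Int) (c : Nat) : List Int :=
  if grow.getD c 0 ≠ 0 then
    if o.getD (w - 1 - c) 0 = 0 then o.set (w - 1 - c) (grow.getD c 0) else o
  else o

def chsRow (w : Nat) (grow : List Int) (orow : List Int) : List Int :=
  (List.range w).foldl (chsStep w grow) orow

theorem chsStep_length (w : Nat) (grow o : List Int) (c : Nat) :
    (chsStep w grow o c).length = o.length := by
  unfold chsStep; split_ifs <;> simp

theorem chsStep_getD_ne (w : Nat) (grow o : List Int) (c j : Nat) (h : w - 1 - c ≠ j) :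
    (chsStep w grow o c).getD j 0 = o.getD j 0 := by
  unfold chsStep
  split_ifs with h1 h2
  · exact getD_set_ne 0 _ o _ j h
  · rfl
  · rfl

-- a fold whose every step only rewrites row r factors through that row
theorem foldl_set_row (f : List Int → Nat → List Int) :
    ∀ (cs : List Nat) (out : List (List Int)) (r : Nat), r < out.length →
    cs.foldl (fun o c => o.set r (f (o.getD r []) c)) out
      = out.set r (cs.foldl f (out.getD r [])) := by
  intro cs
  induction cs with
  | nil => intro out r _; rw [List.foldl_nil, List.foldl_nil, set_getD_self]
  | cons c cs ih =>
    intro out r hr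
    rw [List.foldl_cons, List.foldl_cons,
        ih (out.set r (f (out.getD r []) c)) r (by simpa using hr),
        getD_set_eq [] _ out r hr, List.set_set]

-- A's inner-loop body equals the row-factored form, as functions
theorem inner_body_eq (w : Nat) (grow : List Int) (r : Nat) :
    (fun (out : List (List Int)) (c : Nat) =>
      let v := grow.getD c 0
      if v ≠ 0 then
        if (out.getD r []).getD (w - 1 - c) 0 = 0 then
          out.set r ((out.getD r []).set (w - 1 - c) (grow.getD c 0))
        else out
      else out)
    = (fun o c => o.set r (chsStep w grow (o.getD r []) c)) := by
  funext o c
  simp only [chsStep]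
  split_ifs with h1 h2
  · rfl
  · rw [set_getD_self]
  · rw [set_getD_self]

-- fold with per-index set: untouched indices keep their value
theorem outer_getD_notmem (G : Nat → List Int → List Int) :
    ∀ (cs : List Nat) (out : List (List Int)) (j : Nat), j ∉ cs →
    (cs.foldl (fun o r => o.set r (G r (o.getD r []))) out).getD j [] = out.getD j [] := by
  intro cs
  induction cs with
  | nil => intro out j _; rfl
  | cons c cs ih =>
    intro out j hj
    simp only [List.mem_cons, not_or] at hj
    rw [List.foldl_cons, ih _ j hj.2, getD_set_ne [] _ out c j (Ne.symm hj.1)]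

theorem outer_length (G : Nat → List Int → List Int) :
    ∀ (cs : List Nat) (out : List (List Int)),
    (cs.foldl (fun o r => o.set r (G r (o.getD r []))) out).length = out.length := by
  intro cs
  induction cs with
  | nil => intro out; rfl
  | cons c cs ih => intro out; rw [List.foldl_cons, ih]; simp

theorem outer_getD_mem (G : Nat → List Int → List Int) :
    ∀ (cs : List Nat) (out : List (List Int)) (j : Nat), cs.Nodup →
    (∀ i ∈ cs, i < out.length) → j ∈ cs →
    (cs.foldl (fun o r => o.set r (G r (o.getD r []))) out).getD j [] = G j (out.getD j []) := by
  intro cs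
  induction cs with
  | nil => intro _ j _ _ h; simp at h
  | cons c cs ih =>
    intro out j hnd hlt hj
    rw [List.foldl_cons]
    rcases List.mem_cons.1 hj with hj | hj
    · subst hj
      rw [outer_getD_notmem G cs _ j (List.nodup_cons.1 hnd).1]
      exact getD_set_eq [] _ out j (hlt j (by simp))
    · have hc : c ≠ j := by
        rintro rfl; exact (List.nodup_cons.1 hnd).1 hj
      rw [ih _ j (List.nodup_cons.1 hnd).2 (by intro i hi; simpa using hlt i (by simp [hi])) hj,
          getD_set_ne [] _ out c j hc]

theorem inner_getD_notmem (w : Nat) (grow : List Int) :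
    ∀ (cs : List Nat) (orow : List Int) (j : Nat), (∀ c ∈ cs, w - 1 - c ≠ j) →
    (cs.foldl (chsStep w grow) orow).getD j 0 = orow.getD j 0 := by
  intro cs
  induction cs with
  | nil => intro orow j _; rfl
  | cons c cs ih =>
    intro orow j hj
    rw [List.foldl_cons, ih _ j (fun c' hc' => hj c' (by simp [hc'])),
        chsStep_getD_ne w grow orow c j (hj c (by simp))]

theorem inner_length (w : Nat) (grow : List Int) :
    ∀ (cs : List Nat) (orow : List Int),
    (cs.foldl (chsStep w grow) orow).length = orow.length := by
  intro cs
  induction cs with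
  | nil => intro orow; rfl
  | cons c cs ih => intro orow; rw [List.foldl_cons, ih, chsStep_length]

theorem inner_getD_mem (w : Nat) (grow : List Int) :
    ∀ (cs : List Nat) (orow : List Int) (c : Nat), cs.Nodup → (∀ c' ∈ cs, c' < w) →
    c ∈ cs → w - 1 - c < orow.length →
    (cs.foldl (chsStep w grow) orow).getD (w - 1 - c) 0
      = if grow.getD c 0 ≠ 0 ∧ orow.getD (w - 1 - c) 0 = 0
        then grow.getD c 0 else orow.getD (w - 1 - c) 0 := by
  intro cs
  induction cs with
  | nil => intro _ c _ _ h; simp at h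
  | cons c' cs ih =>
    intro orow c hnd hlt hc hr
    rw [List.foldl_cons]
    rcases List.mem_cons.1 hc with hc | hc
    · subst hc
      have hmir : ∀ c'' ∈ cs, w - 1 - c'' ≠ w - 1 - c := by
        intro c'' hc''
        have h1 : c'' < w := hlt c'' (by simp [hc''])
        have h2 : c < w := hlt c (by simp)
        have h3 : c'' ≠ c := by rintro rfl; exact (List.nodup_cons.1 hnd).1 hc''
        omega
      rw [inner_getD_notmem w grow cs _ _ hmir]
      by_cases h1 : grow.getD c 0 ≠ 0
      · by_cases h2 : orow.getD (w - 1 - c) 0 = 0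
        · rw [show chsStep w grow orow c = orow.set (w - 1 - c) (grow.getD c 0) from by
              unfold chsStep; rw [if_pos h1, if_pos h2]]
          rw [getD_set_eq 0 _ orow _ hr, if_pos ⟨h1, h2⟩]
        · rw [show chsStep w grow orow c = orow from by
              unfold chsStep; rw [if_pos h1, if_neg h2]]
          rw [if_neg (fun h => h2 h.2)]
      · rw [show chsStep w grow orow c = orow from by
            unfold chsStep; rw [if_neg h1]]
        rw [if_neg (fun h => h1 h.1)]
    · have hne : c' ≠ c := by rintro rfl; exact (List.nodup_cons.1 hnd).1 hc
      have hmir : w - 1 - c' ≠ w - 1 - c := by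
        have := hlt c' (by simp); have := hlt c (by simp [hc]); omega
      rw [ih _ c (List.nodup_cons.1 hnd).2 (fun i hi => hlt i (by simp [hi])) hc
            (by rw [chsStep_length]; omega),
          chsStep_getD_ne w grow orow c' _ hmir]

-- per-row agreement: A's in-place row result equals the zip-with-reversed-prefix merge
theorem row_eq (w : Nat) (row : List Int) (hw : w ≤ row.length) :
    chsRow w row row
      = ((row.zip (row.take w).reverse).map (fun p => if p.1 ≠ 0 then p.1 else p.2))
          ++ row.drop w := by
  have hzlen : (row.zip (row.take w).reverse).length = w := by
    simp [List.length_zip, List.length_take]; omega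
  apply List.ext_getElem
  · rw [show chsRow w row row = (List.range w).foldl (chsStep w row) row from rfl,
        inner_length]
    simp [hzlen]; omega
  · intro j h1 h2
    have hmlen : ((row.zip (row.take w).reverse).map
        (fun p => if p.1 ≠ 0 then p.1 else p.2)).length = w := by
      simp only [List.length_map, hzlen]
    have hjr : j < row.length := by
      have := inner_length w row (List.range w) row
      unfold chsRow at h1; omega
    by_cases hjw : j < w
    · -- mirrored zone
      have hwj : w - 1 - j < row.length := by omega
      have key := inner_getD_mem w row (List.range w) row (w - 1 - j)
        (List.nodup_range) (by intro c hc; simpa using hc)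
        (by simp; omega) (by omega)
      have hmm : w - 1 - (w - 1 - j) = j := by omega
      rw [hmm] at key
      have lhs : (chsRow w row row)[j] = (chsRow w row row).getD j 0 := by
        rw [List.getD_eq_getElem _ _ h1]
      rw [lhs]
      unfold chsRow
      rw [key]
      rw [List.getElem_append_left (by omega)]
      have hrev : ((row.take w).reverse)[j]'(by simp [List.length_take]; omega)
          = row[w - 1 - j]'hwj := by
        rw [List.getElem_reverse, List.getElem_take]
        congr 1
        simp [List.length_take]
        omega
      simp only [List.getElem_map, List.getElem_zip, hrev]
      rw [List.getD_eq_getElem _ _ hwj, List.getD_eq_getElem _ _ hjr]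
      by_cases hz : row[j]'hjr = 0
      · by_cases ha : row[w - 1 - j]'hwj = 0
        · simp [hz, ha]
        · simp [hz, ha]
      · simp [hz]
    · -- overhang zone: untouched by A, copied by B
      have lhs : (chsRow w row row)[j] = (chsRow w row row).getD j 0 := by
        rw [List.getD_eq_getElem _ _ h1]
      rw [lhs]
      unfold chsRow
      rw [inner_getD_notmem w row (List.range w) row j
            (by intro c hc; simp at hc; omega)]
      rw [List.getElem_append_right (by omega)]
      rw [List.getD_eq_getElem _ _ hjr, List.getElem_drop]
      congr 1
      omega

-- B's two-pointer recursion computes the zip-with-own-reverse merge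
theorem mergeEnds_eq_zip (xs : List Int) :
    mergeEnds xs = (xs.zip xs.reverse).map (fun p => if p.1 ≠ 0 then p.1 else p.2) := by
  induction xs using List.bidirectionalRec with
  | nil => simp [mergeEnds]
  | singleton a =>
      rw [show mergeEnds [a] = [a] from by rw [mergeEnds]; simp]
      simp
  | cons_append a ys b ih =>
      have hstep : mergeEnds (a :: (ys ++ [b]))
          = (if a ≠ 0 then a else b) :: (mergeEnds ys ++ [if b ≠ 0 then b else a]) := by
        have hlast : (a :: (ys ++ [b])).getLast?.getD 0 = b := by
          rw [show a :: (ys ++ [b]) = (a :: ys) ++ [b] from by simp,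
              List.getLast?_concat]
          rfl
        conv_lhs => rw [mergeEnds]
        rw [dif_neg (by simp)]
        simp [hlast]
      rw [hstep, ih]
      have hrev : (a :: (ys ++ [b])).reverse = b :: (ys.reverse ++ [a]) := by simp
      rw [hrev]
      rw [show (a :: (ys ++ [b])).zip (b :: (ys.reverse ++ [a]))
            = (a, b) :: (ys ++ [b]).zip (ys.reverse ++ [a]) from rfl]
      rw [List.zip_append (by simp)]
      simp

-- bridging: zipping row with (row.take w).reverse only sees the first w cells of row
theorem zip_take_eq (row : List Int) (w : Nat) (_hw : w ≤ row.length) :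
    row.zip (row.take w).reverse = (row.take w).zip (row.take w).reverse := by
  apply List.ext_getElem
  · simp [List.length_zip, List.length_take]
  · intro j h1 h2
    simp only [List.getElem_zip, List.getElem_take]

-- ===== VERDICT (by name: the statement is the Claim_ definition above) =====
theorem complete_horizontal_symmetry_py_spec : Claim_equal_complete_horizontal_symmetry_py := by
  intro g _ hpre
  obtain ⟨hne, hrect⟩ := hpre
  unfold Spec_complete_horizontal_symmetry_py
  unfold complete_horizontal_symmetry_py complete_horizontal_symmetry_py_alt
  simp only []
  set w := (g.headD []).length with hw
  have hmapid : g.map (fun row => row) = g := by simp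
  rw [hmapid]
  -- rewrite the inner loop into row-wise form
  have houter :
      (List.range g.length).foldl (fun out r =>
        (List.range w).foldl (fun out c =>
          let v := (g.getD r []).getD c 0
          if v ≠ 0 then
            if (out.getD r []).getD (w - 1 - c) 0 = 0 then
              out.set r ((out.getD r []).set (w - 1 - c) ((g.getD r []).getD c 0))
            else out
          else out) out) g
      = (List.range g.length).foldl (fun out r =>
          out.set r (chsRow w (g.getD r []) (out.getD r []))) g := by
    have key : ∀ (cs : List Nat) (out : List (List Int)), (∀ i ∈ cs, i < out.length) →
        cs.foldl (fun out r =>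
          (List.range w).foldl (fun out c =>
            let v := (g.getD r []).getD c 0
            if v ≠ 0 then
              if (out.getD r []).getD (w - 1 - c) 0 = 0 then
                out.set r ((out.getD r []).set (w - 1 - c) ((g.getD r []).getD c 0))
              else out
            else out) out) out
        = cs.foldl (fun out r =>
            out.set r (chsRow w (g.getD r []) (out.getD r []))) out := by
      intro cs
      induction cs with
      | nil => intro out _; rfl
      | cons r cs ih =>
        intro out hlt
        rw [List.foldl_cons, List.foldl_cons, inner_body_eq w (g.getD r []) r,
            foldl_set_row (chsStep w (g.getD r [])) (List.range w) out r (hlt r (by simp))]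
        exact ih _ (by intro i hi; simpa using hlt i (by simp [hi]))
    exact key _ g (by intro i hi; simpa using hi)
  rw [houter]
  apply List.ext_getElem
  · rw [outer_length]; simp
  · intro j h1 h2
    have hjg : j < g.length := by rwa [outer_length] at h1
    have key := outer_getD_mem (fun r orow => chsRow w (g.getD r []) orow)
      (List.range g.length) g j List.nodup_range (by intro i hi; simpa using hi)
      (by simpa using hjg)
    rw [List.getD_eq_getElem _ _ h1] at key
    rw [key]
    have hrow : g.getD j [] = g[j]'hjg := List.getD_eq_getElem _ _ hjg
    have hlen : w ≤ (g[j]'hjg).length := hrect _ (List.getElem_mem hjg)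
    show chsRow w (g.getD j []) (g.getD j []) = _
    rw [hrow, row_eq w (g[j]'hjg) hlen]
    rw [zip_take_eq _ _ hlen, ← mergeEnds_eq_zip]
    simp
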